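-- pv_equiv track=rewrite | github.com/Eveheeero/architecture_doc_extractor | generate_fireman_stubs.py | tokenize_pseudocode
-- ===== SOURCE A (Python) =====
-- def tokenize_pseudocode(text: str) -> list[tuple[str, str]]:
--     """Tokenize Intel pseudocode into (kind, value) pairs."""
--     tokens: list[tuple[str, str]] = []
--     i = 0
--     n = len(text)
--     while i < n:
--         # Whitespace
--         if text[i].isspace():
--             i += 1
--             continue
--         # Comment (* ... *)
--         if text[i:i+2] == '(*':
--             end = text.find('*)', i + 2)
--             i = (end + 2) if end >= 0 else n
--             continue
--         # Assignment :=
--         if text[i:i+2] == ':=':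
--             tokens.append(('ASSIGN', ':='))
--             i += 2
--             continue
--         # Shift operators
--         if text[i:i+2] in ('<<', '>>'):
--             tokens.append(('OP', text[i:i+2]))
--             i += 2
--             continue
--         # Single-char delimiters
--         if text[i] in '+-*/;,()[]:#{}':
--             tokens.append(('OP', text[i]))
--             i += 1
--             continue
--         # Number: hex (0x... or digits followed by H) or decimal
--         if text[i].isdigit():
--             j = i
--             while j < n and (text[j].isalnum() or text[j] == '_'):
--                 j += 1
--             word = text[i:j]
--             tokens.append(('NUM', word))
--             i = j
--             continue
--         # Identifier/keyword
--         if text[i].isalpha() or text[i] == '_':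
--             j = i
--             while j < n and (text[j].isalnum() or text[j] == '_'):
--                 j += 1
--             word = text[i:j]
--             tokens.append(('ID', word))
--             i = j
--             continue
--         # Skip unknown
--         i += 1
--     return tokens
-- ===== SOURCE B (Python) =====
-- import re
--
-- # One compiled master regex; alternatives in priority order mirror the manual
-- # dispatch: comment (closed, else unterminated-to-EOF), ':=', shifts/delimiters,
-- # number, identifier, then whitespace/unknown skipped.
-- _MASTER = re.compile(
--     r'(?P<COMMENT>\(\*.*?\*\)|\(\*.*)'
--     r'|(?P<ASSIGN>:=)'
--     r'|(?P<OP><<|>>|[+\-*/;,()\[\]:#{}])'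
--     r'|(?P<NUM>\d\w*)'
--     r'|(?P<ID>[A-Za-z_]\w*)'
--     r'|(?P<SKIP>\s|.)',
--     re.DOTALL,
-- )
--
--
-- def tokenize_pseudocode(text: str) -> list[tuple[str, str]]:
--     """Tokenize Intel pseudocode into (kind, value) pairs."""
--     tokens: list[tuple[str, str]] = []
--     pos = 0
--     n = len(text)
--     while pos < n:
--         m = _MASTER.match(text, pos)
--         pos = m.end()
--         kind = m.lastgroup
--         if kind == 'COMMENT' or kind == 'SKIP':
--             continue
--         tokens.append((kind, m.group()))
--     return tokens
-- ===== Notes on version B (the rewrite author's own statement) =====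
-- stated objective: idiomatic
-- what changed: Replaces the manual index-dispatch while-loop with per-branch inner scanning loops by a single compiled priority-ordered master regex matched repeatedly at the current position.
import Mathlib
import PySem

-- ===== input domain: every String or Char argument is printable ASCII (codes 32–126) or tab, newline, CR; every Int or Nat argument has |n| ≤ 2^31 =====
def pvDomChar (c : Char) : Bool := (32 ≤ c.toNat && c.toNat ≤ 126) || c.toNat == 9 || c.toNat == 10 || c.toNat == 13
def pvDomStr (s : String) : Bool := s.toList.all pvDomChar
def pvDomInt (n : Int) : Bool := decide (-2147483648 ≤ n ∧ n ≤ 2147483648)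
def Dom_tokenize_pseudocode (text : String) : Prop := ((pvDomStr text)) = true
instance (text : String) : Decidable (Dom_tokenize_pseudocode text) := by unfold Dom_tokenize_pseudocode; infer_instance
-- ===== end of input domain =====

-- B replaces A's manual index-dispatch loop (with per-branch inner while-scans) by repeatedly
-- matching one priority-ordered master pattern (in Python, a single compiled regex); objective: idiomatic.

-- shared character classes (exact on the ASCII domain: Python isspace/isdigit/isalpha/isalnum)
def pyIsSpace (c : Char) : Bool :=
  c.toNat == 32 || c.toNat == 9 || c.toNat == 10 || c.toNat == 11 || c.toNat == 12 || c.toNat == 13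
def isDelim (c : Char) : Bool := "+-*/;,()[]:#{}".toList.contains c
def isWordC (c : Char) : Bool := c.isAlphanum || c == '_'

-- ===== PORT A =====
-- text.find('*)', i+2): skip to just past the first "*)", or to the end if absent
def pvFindClose : List Char → List Char
  | [] => []
  | '*' :: ')' :: rest => rest
  | _ :: rest => pvFindClose rest

-- inner `while j < n and (text[j].isalnum() or text[j] == '_')` word scan: (word, rest)
def pvScanW : List Char → List Char × List Char
  | [] => ([], [])
  | c :: cs => if isWordC c then ((c :: (pvScanW cs).1), (pvScanW cs).2) else ([], c :: cs)

theorem pvFindClose_length_le (l : List Char) : (pvFindClose l).length ≤ l.length := by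
  fun_induction pvFindClose <;> simp_all <;> omega

theorem pvScanW_snd_length_le (l : List Char) : (pvScanW l).2.length ≤ l.length := by
  fun_induction pvScanW <;> simp_all <;> try omega

-- A's while-loop over the index i, as structural recursion on the remaining characters;
-- branches in A's order
def pvTokA : List Char → List (String × String)
  | [] => []
  | c :: cs =>
    if pyIsSpace c then pvTokA cs
    else if c == '(' && cs.head? == some '*' then pvTokA (pvFindClose cs.tail)
    else if c == ':' && cs.head? == some '=' then ("ASSIGN", ":=") :: pvTokA cs.tail
    else if c == '<' && cs.head? == some '<' then ("OP", "<<") :: pvTokA cs.tail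
    else if c == '>' && cs.head? == some '>' then ("OP", ">>") :: pvTokA cs.tail
    else if isDelim c then ("OP", String.ofList [c]) :: pvTokA cs
    else if c.isDigit then ("NUM", String.ofList (c :: (pvScanW cs).1)) :: pvTokA (pvScanW cs).2
    else if c.isAlpha || c == '_' then ("ID", String.ofList (c :: (pvScanW cs).1)) :: pvTokA (pvScanW cs).2
    else pvTokA cs
termination_by l => l.length
decreasing_by
  all_goals simp [List.length_tail]
  · have := pvFindClose_length_le cs.tail
    simp [List.length_tail] at this; omega
  all_goals (have := pvScanW_snd_length_le cs; omega)

def tokenize_pseudocode (text : String) : List (String × String) := pvTokA text.toList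

-- ===== PORT B =====
-- hand transcription of the master regex (no regex engine in Lean); exact for this pattern on ASCII.
-- non-greedy `.*?\*\)`: split just past the first "*)", if any
def pvCloseSplit : List Char → Option (List Char)
  | [] => none
  | '*' :: ')' :: rest => some rest
  | _ :: rest => pvCloseSplit rest

-- greedy `\w*`
def pvSpanW (l : List Char) : List Char × List Char := l.span isWordC

-- try the regex alternatives in priority order at the current position;
-- returns (emitted token if any, remaining input)
def pvReMatch (l : List Char) : Option (String × String) × List Char :=
  match l with
  | [] => (none, [])
  | c :: cs =>
    if c == '(' && cs.head? == some '*' then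
      match pvCloseSplit cs.tail with
      | some rest => (none, rest)                  -- \(\*.*?\*\)
      | none => (none, [])                         -- \(\*.*  (DOTALL: to end of input)
    else if c == ':' && cs.head? == some '=' then (some ("ASSIGN", ":="), cs.tail)
    else if c == '<' && cs.head? == some '<' then (some ("OP", "<<"), cs.tail)
    else if c == '>' && cs.head? == some '>' then (some ("OP", ">>"), cs.tail)
    else if isDelim c then (some ("OP", String.ofList [c]), cs)
    else if c.isDigit then (some ("NUM", String.ofList (c :: (pvSpanW cs).1)), (pvSpanW cs).2)
    else if c.isAlpha || c == '_' then (some ("ID", String.ofList (c :: (pvSpanW cs).1)), (pvSpanW cs).2)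
    else (none, cs)                                -- \s and the catch-all . : skip one char

theorem pvCloseSplit_length_le (l : List Char) :
    ∀ r, pvCloseSplit l = some r → r.length ≤ l.length := by
  fun_induction pvCloseSplit with
  | case1 => simp
  | case2 rest => intro r hr; simp_all; omega
  | case3 => intro r hr; rename_i ih; exact le_trans (ih r hr) (by simp)

theorem pvReMatch_snd_le (c : Char) (cs : List Char) :
    (pvReMatch (c :: cs)).2.length ≤ cs.length := by
  have hspan : (pvSpanW cs).2.length ≤ cs.length := by
    simp only [pvSpanW, List.span_eq_takeWhile_dropWhile]
    exact List.length_dropWhile_le _ _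
  simp only [pvReMatch]
  split_ifs <;> simp_all
  split
  case _ r hr =>
    have h1 := pvCloseSplit_length_le cs.tail r hr
    simp [List.length_tail] at h1 ⊢; omega
  case _ => simp

-- driver: repeatedly match the master pattern, collecting the emitted tokens
def pvTokB : List Char → List (String × String)
  | [] => []
  | c :: cs =>
    let r := pvReMatch (c :: cs)
    match r.1 with
    | some t => t :: pvTokB r.2
    | none => pvTokB r.2
termination_by l => l.length
decreasing_by
  all_goals
    have h := pvReMatch_snd_le c cs
    simp; omega

def tokenize_pseudocode_alt (text : String) : List (String × String) := pvTokB text.toList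

-- ===== PRECONDITION & SPEC =====
def Spec_tokenize_pseudocode (text : String) (out : List (String × String)) : Prop := out = tokenize_pseudocode_alt text
instance (text : String) (out : List (String × String)) : Decidable (Spec_tokenize_pseudocode text out) := by unfold Spec_tokenize_pseudocode; infer_instance

-- ===== CLAIM (what is proved, stated in full; the proofs are below) =====
def Claim_equal_tokenize_pseudocode : Prop := ∀ (text : String), Dom_tokenize_pseudocode text → Spec_tokenize_pseudocode text (tokenize_pseudocode text)

-- ===== LEMMAS AND PROOFS =====

theorem pvFindClose_eq (l : List Char) : pvFindClose l = (pvCloseSplit l).getD [] := by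
  fun_induction pvFindClose <;> simp [pvCloseSplit] <;> simp_all

theorem pvScanW_eq (l : List Char) : pvScanW l = pvSpanW l := by
  fun_induction pvScanW <;> simp_all [pvSpanW, List.span_eq_takeWhile_dropWhile]

theorem char_eq_of_toNat {c d : Char} (h : c.toNat = d.toNat) : c = d := by
  exact Char.ext (by exact_mod_cast UInt32.toNat_inj.mp h)

theorem pyIsSpace_cases {c : Char} (h : pyIsSpace c = true) :
    c = ' ' ∨ c = '\t' ∨ c = '\n' ∨ c = '\x0b' ∨ c = '\x0c' ∨ c = '\r' := by
  simp only [pyIsSpace, Bool.or_eq_true, beq_iff_eq] at h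
  rcases h with ((((h|h)|h)|h)|h)|h
  · exact Or.inl (char_eq_of_toNat h)
  · exact Or.inr (Or.inl (char_eq_of_toNat h))
  · exact Or.inr (Or.inr (Or.inl (char_eq_of_toNat h)))
  · exact Or.inr (Or.inr (Or.inr (Or.inl (char_eq_of_toNat h))))
  · exact Or.inr (Or.inr (Or.inr (Or.inr (Or.inl (char_eq_of_toNat h)))))
  · exact Or.inr (Or.inr (Or.inr (Or.inr (Or.inr (char_eq_of_toNat h)))))

theorem tokAB_eq (l : List Char) : pvTokA l = pvTokB l := by
  fun_induction pvTokA with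
  | case1 => simp [pvTokB]
  | case2 c cs h1 ih =>
    rcases pyIsSpace_cases h1 with rfl|rfl|rfl|rfl|rfl|rfl <;>
      simpa [pvTokB, pvReMatch, isDelim] using ih
  | case3 c cs h1 h2 ih =>
    simp only [pvTokB, pvReMatch, if_pos h2]
    rw [ih, pvFindClose_eq]
    cases hcl : pvCloseSplit cs.tail <;> simp
  | case4 c cs h1 h2 h3 ih =>
    simp only [pvTokB, pvReMatch, if_neg h2, if_pos h3]
    simp [ih]
  | case5 c cs h1 h2 h3 h4 ih =>
    simp only [pvTokB, pvReMatch, if_neg h2, if_neg h3, if_pos h4]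
    simp [ih]
  | case6 c cs h1 h2 h3 h4 h5 ih =>
    simp only [pvTokB, pvReMatch, if_neg h2, if_neg h3, if_neg h4, if_pos h5]
    simp [ih]
  | case7 c cs h1 h2 h3 h4 h5 h6 ih =>
    simp only [pvTokB, pvReMatch, if_neg h2, if_neg h3, if_neg h4, if_neg h5, if_pos h6]
    simp [ih]
  | case8 c cs h1 h2 h3 h4 h5 h6 h7 ih =>
    simp only [pvTokB, pvReMatch, if_neg h2, if_neg h3, if_neg h4, if_neg h5, if_neg h6,
      if_pos h7]
    rw [← pvScanW_eq]
    simp [ih]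
  | case9 c cs h1 h2 h3 h4 h5 h6 h7 h8 ih =>
    simp only [pvTokB, pvReMatch, if_neg h2, if_neg h3, if_neg h4, if_neg h5, if_neg h6,
      if_neg h7, if_pos h8]
    rw [← pvScanW_eq]
    simp [ih]
  | case10 c cs h1 h2 h3 h4 h5 h6 h7 h8 ih =>
    simp only [pvTokB, pvReMatch, if_neg h2, if_neg h3, if_neg h4, if_neg h5, if_neg h6,
      if_neg h7, if_neg h8]
    simpa using ih

-- ===== VERDICT (by name: the statement is the Claim_ definition above) =====
theorem tokenize_pseudocode_spec : Claim_equal_tokenize_pseudocode := by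
  intro text _
  unfold Spec_tokenize_pseudocode tokenize_pseudocode tokenize_pseudocode_alt
  exact tokAB_eq text.toList
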